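-- pv_equiv track=rewrite | github.com/Artiffusion-Inc/skating-biomechanics-ml | experiments/exp_transformer_features.py | build_type_mapping
-- ===== SOURCE A (Python) =====
-- def build_type_mapping(labels, n_classes):
--     """Build element_type mapping based on FSC label structure.
--     FSC classes 0-27: jumps, 28-43: spins, 44-51: step sequences, 52-57: lifts, 58-63: other
--     """
--     mapping = {}
--     for c in range(n_classes):
--         if c < 28:
--             mapping[c] = 0  # jump
--         elif c < 44:
--             mapping[c] = 1  # spin
--         elif c < 52:
--             mapping[c] = 2  # step
--         elif c < 58:
--             mapping[c] = 3  # lift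
--         else:
--             mapping[c] = 4  # other
--     return mapping
-- ===== SOURCE B (Python) =====
-- def build_type_mapping(labels, n_classes):
--     """Build element_type mapping based on FSC label structure.
--     FSC classes 0-27: jumps, 28-43: spins, 44-51: step sequences, 52-57: lifts, 58-63: other
--     """
--     bounds = [28, 44, 52, 58]
--     return {c: sum(b <= c for b in bounds) for c in range(n_classes)}
-- ===== Notes on version B (the rewrite author's own statement) =====
-- stated objective: idiomatic
-- what changed: Replaces the five-way if/elif branch ladder inside an imperative dict-building loop with a dict comprehension whose bucket is computed arithmetically as the count of boundary cutpoints [28,44,52,58] that are <= the class index.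
import Mathlib
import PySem

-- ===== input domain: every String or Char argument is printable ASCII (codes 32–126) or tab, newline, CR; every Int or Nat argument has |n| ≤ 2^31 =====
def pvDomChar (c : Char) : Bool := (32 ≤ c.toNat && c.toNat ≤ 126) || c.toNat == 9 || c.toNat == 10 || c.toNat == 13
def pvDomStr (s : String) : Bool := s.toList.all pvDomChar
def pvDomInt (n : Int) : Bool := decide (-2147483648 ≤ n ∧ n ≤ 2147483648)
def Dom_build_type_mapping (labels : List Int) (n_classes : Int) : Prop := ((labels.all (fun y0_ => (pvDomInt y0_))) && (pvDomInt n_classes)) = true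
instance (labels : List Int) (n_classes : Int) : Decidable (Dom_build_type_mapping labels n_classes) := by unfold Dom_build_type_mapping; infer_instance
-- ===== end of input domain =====

-- B replaces A's five-way if/elif ladder in an imperative dict-building loop with a dict
-- comprehension computing each bucket as the count of cutpoints [28,44,52,58] that are <= the
-- class index (objective: idiomatic; same O(n) cost).


-- ===== PORT A =====
def build_type_mapping (labels : List Int) (n_classes : Int) : List (Int × Int) :=
  ((PySem.List.pyRange 0 n_classes 1).foldl
    (fun (m : PySem.Dict Int Int) c =>
      if c < 28 then m.insert c 0
      else if c < 44 then m.insert c 1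
      else if c < 52 then m.insert c 2
      else if c < 58 then m.insert c 3
      else m.insert c 4)
    PySem.Dict.empty).items

-- ===== PORT B =====
def build_type_mapping_alt (labels : List Int) (n_classes : Int) : List (Int × Int) :=
  (PySem.List.pyRange 0 n_classes 1).map
    (fun c => (c, (([28, 44, 52, 58] : List Int).map (fun b => if b ≤ c then (1 : Int) else 0)).sum))

-- ===== PRECONDITION & SPEC =====
def Spec_build_type_mapping (labels : List Int) (n_classes : Int) (out : List (Int × Int)) : Prop := out = build_type_mapping_alt labels n_classes
instance (labels : List Int) (n_classes : Int) (out : List (Int × Int)) : Decidable (Spec_build_type_mapping labels n_classes out) := by unfold Spec_build_type_mapping; infer_instance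

-- ===== CLAIM (what is proved, stated in full; the proofs are below) =====
def Claim_equal_build_type_mapping : Prop := ∀ (labels : List Int) (n_classes : Int), Dom_build_type_mapping labels n_classes → Spec_build_type_mapping labels n_classes (build_type_mapping labels n_classes)

-- ===== LEMMAS AND PROOFS =====

-- A's branch ladder written as a single value function
def pvBucketA (c : Int) : Int :=
  if c < 28 then 0 else if c < 44 then 1 else if c < 52 then 2 else if c < 58 then 3 else 4

-- Inserting fresh keys along a nodup list appends the items in order.
theorem pv_foldl_insert_items (f : Int → Int) :
    ∀ (l : List Int) (d : PySem.Dict Int Int), l.Nodup → (∀ c ∈ l, d.contains c = false) →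
      (l.foldl (fun m c => m.insert c (f c)) d).items = d.items ++ l.map (fun c => (c, f c)) := by
  intro l
  induction l with
  | nil => intro d _ _; simp
  | cons a l ih =>
    intro d hnd hfresh
    have hfa : d.contains a = false := hfresh a (List.mem_cons_self)
    have hnd' : l.Nodup := hnd.of_cons
    have hfresh' : ∀ c ∈ l, (d.insert a (f a)).contains c = false := by
      intro c hc
      rw [PySem.Dict.contains_insert]
      have hne : c ≠ a := fun h => (List.nodup_cons.mp hnd).1 (h ▸ hc)
      simp [hne, hfresh c (List.mem_cons_of_mem _ hc)]
    simp only [List.foldl_cons, List.map_cons]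
    rw [ih (d.insert a (f a)) hnd' hfresh',
        PySem.Dict.items_insert_of_not_contains d (f a) hfa, List.append_assoc]
    simp

-- A's loop body is insertion of pvBucketA c.
theorem pv_bodyA_eq :
    (fun (m : PySem.Dict Int Int) c =>
      if c < 28 then m.insert c 0
      else if c < 44 then m.insert c 1
      else if c < 52 then m.insert c 2
      else if c < 58 then m.insert c 3
      else m.insert c 4)
    = fun (m : PySem.Dict Int Int) c => m.insert c (pvBucketA c) := by
  funext m c
  unfold pvBucketA
  split_ifs <;> rfl

-- Both bucket formulas agree everywhere.
theorem pv_bucket_eq (c : Int) :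
    pvBucketA c = (([28, 44, 52, 58] : List Int).map (fun b => if b ≤ c then (1 : Int) else 0)).sum := by
  unfold pvBucketA
  simp only [List.map_cons, List.map_nil, List.sum_cons, List.sum_nil]
  split_ifs <;> omega

-- ===== VERDICT (by name: the statement is the Claim_ definition above) =====
theorem build_type_mapping_spec : Claim_equal_build_type_mapping := by
  intro labels n_classes _
  unfold Spec_build_type_mapping build_type_mapping build_type_mapping_alt
  rw [pv_bodyA_eq,
      pv_foldl_insert_items pvBucketA (PySem.List.pyRange 0 n_classes 1) PySem.Dict.empty
        (PySem.List.nodup_pyRange_one 0 n_classes) (fun c _ => PySem.Dict.contains_empty c)]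
  simp [pv_bucket_eq, PySem.Dict.empty]
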